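-- pv_equiv track=rewrite | github.com/chongyangshi/AoC2016 | day8.py | shift_column
-- ===== SOURCE A (Python) =====
-- COLUMNS = 50
--
-- ROWS = 6
--
-- def shift_column(grid, at, by):
--
--     if not 0 <= at < COLUMNS:
--         return grid
--
--     new_grid = [row[:] for row in grid]
--
--     for y in range(0, ROWS):
--         new_y = (y + by) % ROWS
--         new_grid[new_y][at] = grid[y][at]
--
--     return new_grid
-- ===== SOURCE B (Python) =====
-- COLUMNS = 50
--
-- ROWS = 6
--
-- def shift_column(grid, at, by):
--     if not 0 <= at < COLUMNS:
--         return grid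
--     col = [grid[y][at] for y in range(ROWS)]
--     amount = by % ROWS
--     rotated = col if amount == 0 else col[-amount:] + col[:-amount]
--     new_grid = [row[:] for row in grid]
--     for i in range(ROWS):
--         new_grid[i][at] = rotated[i]
--     return new_grid
-- ===== Notes on version B (the rewrite author's own statement) =====
-- stated objective: simpler
-- what changed: Replaces the modular-index scatter (writing grid[y][at] into row (y+by)%ROWS one element at a time) by extracting the whole column, rotating it with a single slice expression (col[-amount:] + col[:-amount] with amount = by % ROWS), and writing the rotated column back in row order.
import Mathlib
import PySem

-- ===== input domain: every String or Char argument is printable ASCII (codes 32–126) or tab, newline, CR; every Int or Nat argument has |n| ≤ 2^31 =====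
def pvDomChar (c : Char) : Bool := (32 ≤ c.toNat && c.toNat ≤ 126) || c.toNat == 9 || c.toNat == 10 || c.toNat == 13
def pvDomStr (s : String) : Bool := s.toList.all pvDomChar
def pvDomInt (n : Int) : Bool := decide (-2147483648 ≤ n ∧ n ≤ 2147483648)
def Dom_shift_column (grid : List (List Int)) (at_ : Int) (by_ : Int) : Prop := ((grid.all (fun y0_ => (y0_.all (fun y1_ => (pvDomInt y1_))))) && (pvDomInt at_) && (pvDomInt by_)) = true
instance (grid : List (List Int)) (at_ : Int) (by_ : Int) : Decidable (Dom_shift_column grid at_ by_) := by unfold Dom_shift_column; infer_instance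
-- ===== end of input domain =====

-- B rotates the extracted column with one slice expression instead of A's modular-index scatter (objective: simpler).

-- ===== PORT A =====
def shift_column (grid : List (List Int)) (at_ : Int) (by_ : Int) : List (List Int) :=
  if ¬ (0 ≤ at_ ∧ at_ < 50) then grid
  else
    let new_grid := grid.map (fun row => PySem.List.slice row none none)
    (PySem.List.pyRange 0 6 1).foldl (fun ng y =>
      let new_y := PySem.Int.mod (y + by_) 6
      PySem.List.pySetD ng new_y
        (PySem.List.pySetD (PySem.List.pyGetD ng new_y []) at_
          (PySem.List.pyGetD (PySem.List.pyGetD grid y []) at_ 0))) new_grid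

-- ===== PORT B =====
def shift_column_alt (grid : List (List Int)) (at_ : Int) (by_ : Int) : List (List Int) :=
  if ¬ (0 ≤ at_ ∧ at_ < 50) then grid
  else
    let col := (PySem.List.pyRange 0 6 1).map
      (fun y => PySem.List.pyGetD (PySem.List.pyGetD grid y []) at_ 0)
    let amount := PySem.Int.mod by_ 6
    let rotated := if amount = 0 then col
      else PySem.List.slice col (some (-amount)) none ++ PySem.List.slice col none (some (-amount))
    let new_grid := grid.map (fun row => PySem.List.slice row none none)
    (PySem.List.pyRange 0 6 1).foldl (fun ng i =>
      PySem.List.pySetD ng i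
        (PySem.List.pySetD (PySem.List.pyGetD ng i []) at_
          (PySem.List.pyGetD rotated i 0))) new_grid

-- ===== PRECONDITION & SPEC =====
-- Pre_ excludes exactly the inputs where A raises IndexError: with 0 ≤ at < 50, a grid with
-- fewer than 6 rows, or one of the first 6 rows shorter than at+1.
def Pre_shift_column (grid : List (List Int)) (at_ : Int) (by_ : Int) : Prop :=
  (0 ≤ at_ ∧ at_ < 50) → (6 ≤ grid.length ∧ ∀ row ∈ grid.take 6, at_ < (row.length : Int))
instance (grid : List (List Int)) (at_ : Int) (by_ : Int) : Decidable (Pre_shift_column grid at_ by_) := by unfold Pre_shift_column; infer_instance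

def pvWitness_shift_column : List (List Int) × Int × Int := ([[1], [2], [3], [4], [5], [6]], 0, 1)

def Spec_shift_column (grid : List (List Int)) (at_ : Int) (by_ : Int) (out : List (List Int)) : Prop := out = shift_column_alt grid at_ by_
instance (grid : List (List Int)) (at_ : Int) (by_ : Int) (out : List (List Int)) : Decidable (Spec_shift_column grid at_ by_ out) := by unfold Spec_shift_column; infer_instance

-- ===== CLAIM (what is proved, stated in full; the proofs are below) =====
def Claim_equal_shift_column : Prop := ∀ (grid : List (List Int)) (at_ : Int) (by_ : Int), Dom_shift_column grid at_ by_ → Pre_shift_column grid at_ by_ → Spec_shift_column grid at_ by_ (shift_column grid at_ by_)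

-- ===== LEMMAS AND PROOFS =====

theorem pvGetD0 {α : Type} (x0 x1 x2 x3 x4 x5 : α) (rest : List α) (d : α) :
    PySem.List.pyGetD (x0::x1::x2::x3::x4::x5::rest) (0:Int) d = x0 := by
  simp [PySem.List.pyGetD, PySem.List.pyGet?, PySem.List.pyIdx?]
  try rw [if_pos (by omega)]
  try simp
theorem pvSetD0 {α : Type} (x0 x1 x2 x3 x4 x5 : α) (rest : List α) (v : α) :
    PySem.List.pySetD (x0::x1::x2::x3::x4::x5::rest) (0:Int) v = v::x1::x2::x3::x4::x5::rest := by
  simp [PySem.List.pySetD, PySem.List.pySet?, PySem.List.pyIdx?]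
  try rw [if_pos (by omega)]
  try simp
theorem pvGetD1 {α : Type} (x0 x1 x2 x3 x4 x5 : α) (rest : List α) (d : α) :
    PySem.List.pyGetD (x0::x1::x2::x3::x4::x5::rest) (1:Int) d = x1 := by
  simp [PySem.List.pyGetD, PySem.List.pyGet?, PySem.List.pyIdx?]
  try rw [if_pos (by omega)]
  try simp
theorem pvSetD1 {α : Type} (x0 x1 x2 x3 x4 x5 : α) (rest : List α) (v : α) :
    PySem.List.pySetD (x0::x1::x2::x3::x4::x5::rest) (1:Int) v = x0::v::x2::x3::x4::x5::rest := by
  simp [PySem.List.pySetD, PySem.List.pySet?, PySem.List.pyIdx?]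
  try rw [if_pos (by omega)]
  try simp
theorem pvGetD2 {α : Type} (x0 x1 x2 x3 x4 x5 : α) (rest : List α) (d : α) :
    PySem.List.pyGetD (x0::x1::x2::x3::x4::x5::rest) (2:Int) d = x2 := by
  simp [PySem.List.pyGetD, PySem.List.pyGet?, PySem.List.pyIdx?]
  try rw [if_pos (by omega)]
  try simp
theorem pvSetD2 {α : Type} (x0 x1 x2 x3 x4 x5 : α) (rest : List α) (v : α) :
    PySem.List.pySetD (x0::x1::x2::x3::x4::x5::rest) (2:Int) v = x0::x1::v::x3::x4::x5::rest := by
  simp [PySem.List.pySetD, PySem.List.pySet?, PySem.List.pyIdx?]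
  try rw [if_pos (by omega)]
  try simp
theorem pvGetD3 {α : Type} (x0 x1 x2 x3 x4 x5 : α) (rest : List α) (d : α) :
    PySem.List.pyGetD (x0::x1::x2::x3::x4::x5::rest) (3:Int) d = x3 := by
  simp [PySem.List.pyGetD, PySem.List.pyGet?, PySem.List.pyIdx?]
  try rw [if_pos (by omega)]
  try simp
theorem pvSetD3 {α : Type} (x0 x1 x2 x3 x4 x5 : α) (rest : List α) (v : α) :
    PySem.List.pySetD (x0::x1::x2::x3::x4::x5::rest) (3:Int) v = x0::x1::x2::v::x4::x5::rest := by
  simp [PySem.List.pySetD, PySem.List.pySet?, PySem.List.pyIdx?]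
  try rw [if_pos (by omega)]
  try simp
theorem pvGetD4 {α : Type} (x0 x1 x2 x3 x4 x5 : α) (rest : List α) (d : α) :
    PySem.List.pyGetD (x0::x1::x2::x3::x4::x5::rest) (4:Int) d = x4 := by
  simp [PySem.List.pyGetD, PySem.List.pyGet?, PySem.List.pyIdx?]
  try rw [if_pos (by omega)]
  try simp
theorem pvSetD4 {α : Type} (x0 x1 x2 x3 x4 x5 : α) (rest : List α) (v : α) :
    PySem.List.pySetD (x0::x1::x2::x3::x4::x5::rest) (4:Int) v = x0::x1::x2::x3::v::x5::rest := by
  simp [PySem.List.pySetD, PySem.List.pySet?, PySem.List.pyIdx?]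
  try rw [if_pos (by omega)]
  try simp
theorem pvGetD5 {α : Type} (x0 x1 x2 x3 x4 x5 : α) (rest : List α) (d : α) :
    PySem.List.pyGetD (x0::x1::x2::x3::x4::x5::rest) (5:Int) d = x5 := by
  simp [PySem.List.pyGetD, PySem.List.pyGet?, PySem.List.pyIdx?]
  try rw [if_pos (by omega)]
  try simp
theorem pvSetD5 {α : Type} (x0 x1 x2 x3 x4 x5 : α) (rest : List α) (v : α) :
    PySem.List.pySetD (x0::x1::x2::x3::x4::x5::rest) (5:Int) v = x0::x1::x2::x3::x4::v::rest := by
  simp [PySem.List.pySetD, PySem.List.pySet?, PySem.List.pyIdx?]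
  try rw [if_pos (by omega)]
  try simp

set_option maxHeartbeats 4000000 in
theorem shift_column_main (r0 r1 r2 r3 r4 r5 : List Int) (rest : List (List Int))
    (at_ by_ : Int) (hat : 0 ≤ at_ ∧ at_ < 50) :
    shift_column (r0 :: r1 :: r2 :: r3 :: r4 :: r5 :: rest) at_ by_
      = shift_column_alt (r0 :: r1 :: r2 :: r3 :: r4 :: r5 :: rest) at_ by_ := by
  have hrange : PySem.List.pyRange 0 6 1 = [0, 1, 2, 3, 4, 5] := by decide
  have hb0 : 0 ≤ by_ % 6 := by omega
  have hb6 : by_ % 6 < 6 := by omega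
  set b := by_ % 6 with hbdef
  have hm : ∀ y : Int, (y + by_) % 6 = (y + b) % 6 := fun y => by omega
  have hdv : (6 ∣ by_) ↔ (b = 0) := by omega
  clear_value b
  interval_cases b <;>
    simp [shift_column, shift_column_alt, hat, hrange, hm, hdv, ← hbdef, List.foldl,
      pvGetD0, pvGetD1, pvGetD2, pvGetD3, pvGetD4, pvGetD5,
      pvSetD0, pvSetD1, pvSetD2, pvSetD3, pvSetD4, pvSetD5,
      PySem.List.slice, PySem.List.clampIdx]

-- ===== VERDICT (by name: the statement is the Claim_ definition above) =====
theorem shift_column_spec : Claim_equal_shift_column := by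
  intro grid at_ by_ hdom hpre
  unfold Spec_shift_column
  by_cases hat : 0 ≤ at_ ∧ at_ < 50
  · obtain ⟨hlen, -⟩ := hpre hat
    obtain _ | ⟨r0, grid⟩ := grid; · simp at hlen
    obtain _ | ⟨r1, grid⟩ := grid; · simp at hlen
    obtain _ | ⟨r2, grid⟩ := grid; · simp at hlen
    obtain _ | ⟨r3, grid⟩ := grid; · simp at hlen
    obtain _ | ⟨r4, grid⟩ := grid; · simp at hlen
    obtain _ | ⟨r5, grid⟩ := grid; · simp at hlen
    exact shift_column_main r0 r1 r2 r3 r4 r5 grid at_ by_ hat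
  · simp [shift_column, shift_column_alt, hat]
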